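-- pv_equiv track=rewrite | github.com/isi-vista/VistaOCR | src/trans_to_uxxxx.py | utf8_to_uxxxx
-- ===== SOURCE A (Python) =====
-- def utf8_to_uxxxx(in_str):
--
--     char_array = []
--     out_str = ""
--     for char in in_str:
--         if char == " ":
--             out_str += '_'.join(char_array) + " "
--             char_array = []
--         else:
--             raw_hex = hex(ord(char))[2:].zfill(4).lower()
--             char_array.append( "u%s" % raw_hex )
--
--     if len(char_array) > 0:
--         out_str += '_'.join(char_array)
--
--     return out_str
-- ===== SOURCE B (Python) =====
-- def utf8_to_uxxxx(in_str):
--     return " ".join(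
--         "_".join(f"u{ord(c):04x}" for c in group)
--         for group in in_str.split(" ")
--     )
-- ===== Notes on version B (the rewrite author's own statement) =====
-- stated objective: idiomatic
-- what changed: Replaces the flush-on-delimiter accumulator loop (mutable char_array/out_str with a post-loop flush) by a split on the explicit single-space separator plus nested joins, and replaces the hex-slice-zfill-lower chain by direct 04x formatting (ported as fixed nibble extraction).
import Mathlib
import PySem

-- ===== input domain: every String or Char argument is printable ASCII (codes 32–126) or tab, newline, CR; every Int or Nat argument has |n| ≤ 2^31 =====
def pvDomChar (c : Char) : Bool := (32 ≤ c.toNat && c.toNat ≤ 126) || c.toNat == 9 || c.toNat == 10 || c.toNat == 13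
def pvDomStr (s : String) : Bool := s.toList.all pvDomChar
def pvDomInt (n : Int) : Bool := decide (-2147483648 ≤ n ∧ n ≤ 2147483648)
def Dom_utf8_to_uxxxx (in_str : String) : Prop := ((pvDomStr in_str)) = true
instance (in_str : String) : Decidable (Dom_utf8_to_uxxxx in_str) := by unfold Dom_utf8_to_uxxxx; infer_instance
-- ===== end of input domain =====

-- B is the idiomatic split-then-join decomposition of A's flush-on-delimiter accumulator loop,
-- with direct 04x formatting per character; same cost, proved equal on the stated ASCII domain.

-- ===== PORT A =====
-- hexDigits is hex(n)[2:] (exact for n ≥ 0, the only case reached: ord(c) ≥ 0)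
def hexDigit (n : Nat) : Char := if n < 10 then Char.ofNat (48 + n) else Char.ofNat (87 + n)

-- fuel = n makes the hex loop structural (never exhausted: n/16 strictly decreases)
def hexDigitsAux : Nat → Nat → List Char
  | 0, n => [hexDigit n]
  | fuel + 1, n =>
    if n < 16 then [hexDigit n]
    else hexDigitsAux fuel (n / 16) ++ [hexDigit (n % 16)]

def hexDigits (n : Nat) : List Char := hexDigitsAux n n

-- "u%s" % hex(ord(char))[2:].zfill(4).lower()
def uCode (c : Char) : List Char :=
  'u' :: PySem.Chars.lower (PySem.Chars.zfill (hexDigits c.toNat) 4)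

-- the loop body: state = (char_array, out_str)
def aStep (st : List (List Char) × List Char) (ch : Char) : List (List Char) × List Char :=
  if ch = ' ' then ([], st.2 ++ PySem.Chars.join ['_'] st.1 ++ [' '])
  else (st.1 ++ [uCode ch], st.2)

def utf8_to_uxxxx (in_str : String) : String :=
  let st := in_str.toList.foldl aStep ([], [])
  String.mk (if st.1.length > 0 then st.2 ++ PySem.Chars.join ['_'] st.1 else st.2)

-- ===== PORT B =====
def bNibble (n : Nat) : Char := if n < 10 then Char.ofNat (n + 48) else Char.ofNat (n + 87)

-- f"u{ord(c):04x}": fixed four-nibble extraction; exact for code points < 0x10000,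
-- which covers every character of the stated ASCII domain
def bCode (c : Char) : List Char :=
  ['u', bNibble (c.toNat / 4096 % 16), bNibble (c.toNat / 256 % 16),
        bNibble (c.toNat / 16 % 16), bNibble (c.toNat % 16)]

-- str.split(" ") (single-char separator, empty pieces kept) is List.splitOn ' '
def utf8_to_uxxxx_alt (in_str : String) : String :=
  String.mk (List.intercalate [' ']
    ((in_str.toList.splitOn ' ').map (fun g => List.intercalate ['_'] (g.map bCode))))

-- ===== PRECONDITION & SPEC =====
def Spec_utf8_to_uxxxx (in_str : String) (out : String) : Prop := out = utf8_to_uxxxx_alt in_str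
instance (in_str : String) (out : String) : Decidable (Spec_utf8_to_uxxxx in_str out) := by unfold Spec_utf8_to_uxxxx; infer_instance

-- ===== CLAIM (what is proved, stated in full; the proofs are below) =====
def Claim_equal_utf8_to_uxxxx : Prop := ∀ (in_str : String), Dom_utf8_to_uxxxx in_str → Spec_utf8_to_uxxxx in_str (utf8_to_uxxxx in_str)

-- ===== LEMMAS AND PROOFS =====

theorem join_eq_intercalate (sep : List Char) (l : List (List Char)) :
    PySem.Chars.join sep l = List.intercalate sep l := rfl

-- A's final value from state (arr, out) and remaining input cs
def aRun (cs : List Char) (arr : List (List Char)) (out : List Char) : List Char :=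
  let st := cs.foldl aStep (arr, out)
  if st.1.length > 0 then st.2 ++ PySem.Chars.join ['_'] st.1 else st.2

-- A's per-group rendering, with the pending accumulator arr merged into the first group
def fGrp (g : List Char) : List Char := PySem.Chars.join ['_'] (g.map uCode)

def encA (arr : List (List Char)) : List (List Char) → List (List Char)
  | [] => []
  | g :: gs => PySem.Chars.join ['_'] (arr ++ g.map uCode) :: gs.map fGrp

theorem join_space_cons (a : List Char) (gs : List (List Char)) (h : gs ≠ []) :
    PySem.Chars.join [' '] (a :: gs) = a ++ ' ' :: PySem.Chars.join [' '] gs := by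
  obtain ⟨b, rest, rfl⟩ := List.exists_cons_of_ne_nil h
  simp [PySem.Chars.join, List.intercalate, List.intersperse]

theorem aRun_eq (cs : List Char) : ∀ (arr : List (List Char)) (out : List Char),
    aRun cs arr out = out ++ PySem.Chars.join [' '] (encA arr (cs.splitOn ' ')) := by
  induction cs with
  | nil =>
    intro arr out
    simp only [aRun, List.foldl_nil, List.splitOn_nil, encA, List.map_nil]
    by_cases h : arr = []
    · subst h; simp [PySem.Chars.join, List.intercalate]
    · rw [if_pos (by simpa [List.length_pos_iff] using h)]
      simp [PySem.Chars.join, List.intercalate]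
  | cons c cs ih =>
    intro arr out
    by_cases hc : c = ' '
    · subst hc
      have h1 : aRun (' ' :: cs) arr out
          = aRun cs [] (out ++ PySem.Chars.join ['_'] arr ++ [' ']) := by
        simp [aRun, aStep]
      rw [h1, ih]
      have h2 : (' ' :: cs).splitOn ' ' = [] :: cs.splitOn ' ' := by
        simp [List.splitOn, List.splitOnP_cons]
      rw [h2]
      obtain ⟨g, gs, hgs⟩ := List.exists_cons_of_ne_nil
        (List.splitOnP_ne_nil (fun a => a == ' ') cs)
      have hsp : cs.splitOn ' ' = g :: gs := hgs
      rw [hsp]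
      have henc : encA ([] : List (List Char)) (g :: gs) = fGrp g :: gs.map fGrp := by
        simp [encA, fGrp]
      rw [henc]
      rw [show encA arr ([] :: g :: gs)
            = PySem.Chars.join ['_'] arr :: fGrp g :: gs.map fGrp by simp [encA, fGrp]]
      rw [join_space_cons (PySem.Chars.join ['_'] arr) (fGrp g :: gs.map fGrp) (by simp)]
      simp
    · have h1 : aRun (c :: cs) arr out = aRun cs (arr ++ [uCode c]) out := by
        simp [aRun, aStep, hc]
      rw [h1, ih]
      have h2 : (c :: cs).splitOn ' ' = (cs.splitOn ' ').modifyHead (List.cons c) := by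
        simp [List.splitOn, List.splitOnP_cons, hc]
      rw [h2]
      obtain ⟨g, gs, hgs⟩ := List.exists_cons_of_ne_nil
        (List.splitOnP_ne_nil (fun a => a == ' ') cs)
      have hsp : cs.splitOn ' ' = g :: gs := hgs
      rw [hsp]
      simp [encA, List.append_assoc]

-- the two per-character encodings agree on every domain character (all codes < 128)
theorem uCode_eq_bCode (c : Char) (h : pvDomChar c = true) : uCode c = bCode c := by
  have hlt : c.toNat < 128 := by
    unfold pvDomChar at h
    simp only [Bool.or_eq_true, Bool.and_eq_true, decide_eq_true_eq, beq_iff_eq] at h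
    omega
  have key : ∀ n : Nat, n < 128 →
      ('u' :: PySem.Chars.lower (PySem.Chars.zfill (hexDigits n) 4))
        = ['u', bNibble (n / 4096 % 16), bNibble (n / 256 % 16),
              bNibble (n / 16 % 16), bNibble (n % 16)] := by decide
  have := key c.toNat hlt
  simpa [uCode, bCode] using this

-- the group maps under the two encodings agree on a domain string
theorem split_map_eq (cs : List Char) (h : cs.all pvDomChar = true) :
    (cs.splitOn ' ').map (List.map uCode) = (cs.splitOn ' ').map (List.map bCode) := by
  induction cs with
  | nil => rfl
  | cons c cs ih =>
    rw [List.all_cons, Bool.and_eq_true] at h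
    have hc : pvDomChar c = true := h.1
    have hcs : cs.all pvDomChar = true := h.2
    by_cases hsp : c = ' '
    · subst hsp
      have h2 : (' ' :: cs).splitOn ' ' = [] :: cs.splitOn ' ' := by
        simp [List.splitOn, List.splitOnP_cons]
      rw [h2]
      simpa using ih hcs
    · have h2 : (c :: cs).splitOn ' ' = (cs.splitOn ' ').modifyHead (List.cons c) := by
        simp [List.splitOn, List.splitOnP_cons, hsp]
      rw [h2]
      obtain ⟨g, gs, hgs⟩ := List.exists_cons_of_ne_nil
        (List.splitOnP_ne_nil (fun a => a == ' ') cs)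
      have hsp' : cs.splitOn ' ' = g :: gs := hgs
      rw [hsp'] at ih ⊢
      have ih' := ih hcs
      simp only [List.map_cons, List.cons.injEq] at ih'
      simp [List.map_cons, uCode_eq_bCode c hc, ih'.1, ih'.2]

-- ===== VERDICT (by name: the statement is the Claim_ definition above) =====
theorem utf8_to_uxxxx_spec : Claim_equal_utf8_to_uxxxx := by
  intro s hdom
  unfold Spec_utf8_to_uxxxx utf8_to_uxxxx_alt
  have h0 : utf8_to_uxxxx s = String.mk (aRun s.toList [] []) := rfl
  rw [h0, aRun_eq s.toList [] []]
  obtain ⟨g, gs, hgs⟩ := List.exists_cons_of_ne_nil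
    (List.splitOnP_ne_nil (fun a => a == ' ') s.toList)
  have hsp : s.toList.splitOn ' ' = g :: gs := hgs
  have hall : s.toList.all pvDomChar = true := hdom
  have hmap := split_map_eq s.toList hall
  rw [hsp] at hmap ⊢
  simp only [List.map_cons, List.cons.injEq] at hmap
  simp only [encA, List.nil_append, join_eq_intercalate]
  rw [hmap.1]
  rw [List.map_cons]
  have htail : List.map fGrp gs
      = List.map (fun g => List.intercalate ['_'] (List.map bCode g)) gs := by
    have h2 := congrArg (List.map (List.intercalate ['_'])) hmap.2
    rw [List.map_map, List.map_map] at h2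
    exact h2
  rw [htail]
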